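-- pv_equiv track=rewrite | github.com/sdhers/RAINSTORM | rainstorm/seize_labels.py | count_alternations_and_entries
-- ===== SOURCE A (Python) =====
-- def count_alternations_and_entries(area_sequence):
--     """
--     Count the number of alternations and total area entries in a given sequence of visited areas.
--
--     Args:
--         area_sequence (list): Ordered list of visited areas.
--
--     Returns:
--         tuple: (Number of alternations, Total number of area entries)
--     """
--     # Remove consecutive duplicates (track only area **entrances**)
--     filtered_seq = [area_sequence[i] for i in range(len(area_sequence)) if i == 0 or area_sequence[i] != area_sequence[i - 1]]
--
--     # Remove 'other' from the sequence
--     filtered_seq = [area for area in filtered_seq if area != "other"]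
--
--     total_entries = len(filtered_seq)  # Total number of area entrances
--     alternations = 0
--
--     for i in range(len(filtered_seq) - 2):
--         if filtered_seq[i] != filtered_seq[i + 2] and filtered_seq[i] != filtered_seq[i + 1]:
--             alternations += 1
--
--     return alternations, total_entries
-- ===== SOURCE B (Python) =====
-- def count_alternations_and_entries(area_sequence):
--     """Single pass: dedup consecutive raw elements, skip 'other', and keep a
--     two-element window of the filtered stream to count alternations on the fly."""
--     alternations = 0
--     total_entries = 0
--     last = None      # last raw element seen (None = before first element)
--     prev2 = None     # second-to-last element of the filtered stream
--     prev1 = None     # last element of the filtered stream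
--     for x in area_sequence:
--         if last is None or x != last:
--             if x != "other":
--                 total_entries += 1
--                 if total_entries >= 3 and prev2 != x and prev2 != prev1:
--                     alternations += 1
--                 prev2, prev1 = prev1, x
--         last = x
--     return alternations, total_entries
-- ===== Notes on version B (the rewrite author's own statement) =====
-- stated objective: simpler
-- what changed: Replaces A's three passes (index-based dedup comprehension, 'other' filter pass, and a windowed index loop over the filtered list) by a single streaming loop that keeps the last raw element and the last two filtered elements and counts entries and alternations on the fly.
import Mathlib
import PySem

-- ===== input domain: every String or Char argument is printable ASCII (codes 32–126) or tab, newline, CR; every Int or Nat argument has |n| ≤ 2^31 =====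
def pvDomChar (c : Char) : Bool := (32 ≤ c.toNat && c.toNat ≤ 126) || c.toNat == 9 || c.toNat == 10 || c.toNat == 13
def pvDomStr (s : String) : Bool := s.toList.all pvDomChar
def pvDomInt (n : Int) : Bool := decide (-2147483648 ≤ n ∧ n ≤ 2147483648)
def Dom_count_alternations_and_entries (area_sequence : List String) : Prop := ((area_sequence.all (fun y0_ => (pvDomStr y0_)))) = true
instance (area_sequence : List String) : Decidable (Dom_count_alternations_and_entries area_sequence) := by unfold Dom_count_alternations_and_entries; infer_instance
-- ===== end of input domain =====

-- B replaces A's three passes (index-comprehension dedup, 'other' filter, windowed index loop)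
-- by one streaming pass keeping the last raw element and the last two filtered elements (objective: simpler one-pass decomposition).

-- ===== PORT A =====
-- indices produced by the comprehensions are always in range, so `.getD ""` never supplies the default
def count_alternations_and_entries (area_sequence : List String) : Int × Int :=
  let filtered_seq :=
    ((List.range area_sequence.length).filter
      (fun (i : Nat) => decide (i = 0 ∨ PySem.List.pyGet? area_sequence ((i : Nat) : Int) ≠ PySem.List.pyGet? area_sequence (((i : Nat) : Int) - 1)))).map
      (fun (i : Nat) => (PySem.List.pyGet? area_sequence ((i : Nat) : Int)).getD "")
  let filtered_seq2 := filtered_seq.filter (fun area => area ≠ "other")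
  let total_entries : Int := filtered_seq2.length
  let alternations : Int :=
    (List.range (filtered_seq2.length - 2)).foldl
      (fun acc (i : Nat) =>
        if PySem.List.pyGet? filtered_seq2 ((i : Nat) : Int) ≠ PySem.List.pyGet? filtered_seq2 (((i : Nat) : Int) + 2) ∧
           PySem.List.pyGet? filtered_seq2 ((i : Nat) : Int) ≠ PySem.List.pyGet? filtered_seq2 (((i : Nat) : Int) + 1)
        then acc + 1 else acc) 0
  (alternations, total_entries)

-- ===== PORT B =====
-- the for-loop of Source B: state = (last raw element, last two filtered elements, counters)
def pvAltLoop : List String → Option String → Option String → Option String → Int → Int → Int × Int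
  | [], _, _, _, alternations, total_entries => (alternations, total_entries)
  | x :: rest, last, prev2, prev1, alternations, total_entries =>
    if last ≠ some x then
      if x ≠ "other" then
        let total' := total_entries + 1
        let alt' := if 3 ≤ total' ∧ prev2 ≠ some x ∧ prev2 ≠ prev1 then alternations + 1 else alternations
        pvAltLoop rest (some x) prev1 (some x) alt' total'
      else pvAltLoop rest (some x) prev2 prev1 alternations total_entries
    else pvAltLoop rest (some x) prev2 prev1 alternations total_entries

def count_alternations_and_entries_alt (area_sequence : List String) : Int × Int :=
  pvAltLoop area_sequence none none none 0 0

-- ===== PRECONDITION & SPEC =====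
def Spec_count_alternations_and_entries (area_sequence : List String) (out : Int × Int) : Prop := out = count_alternations_and_entries_alt area_sequence
instance (area_sequence : List String) (out : Int × Int) : Decidable (Spec_count_alternations_and_entries area_sequence out) := by unfold Spec_count_alternations_and_entries; infer_instance

-- ===== CLAIM (what is proved, stated in full; the proofs are below) =====
def Claim_equal_count_alternations_and_entries : Prop := ∀ (area_sequence : List String), Dom_count_alternations_and_entries area_sequence → Spec_count_alternations_and_entries area_sequence (count_alternations_and_entries area_sequence)

-- ===== LEMMAS AND PROOFS =====

-- the common intermediate stream: consecutive-dup removal given the previous raw element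
def pvDedup : Option String → List String → List String
  | _, [] => []
  | p, x :: r => if p ≠ some x then x :: pvDedup (some x) r else pvDedup (some x) r

-- alternation count over 3-element windows of the filtered stream
def pvAltCount : List String → Int
  | a :: b :: c :: r => (if a ≠ c ∧ a ≠ b then 1 else 0) + pvAltCount (b :: c :: r)
  | _ => 0

-- B's raw loop factors through pvDedup and the 'other' filter
def pvLoopD : List String → Option String → Option String → Int → Int → Int × Int
  | [], _, _, alternations, total_entries => (alternations, total_entries)
  | x :: r, prev2, prev1, alternations, total_entries =>
    pvLoopD r prev1 (some x)
      (if 3 ≤ total_entries + 1 ∧ prev2 ≠ some x ∧ prev2 ≠ prev1 then alternations + 1 else alternations)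
      (total_entries + 1)

-- A's dedup comprehension equals pvDedup (pvA1gen: tail part with previous element p)
lemma pvA1gen (t : List String) : ∀ (p : String),
    ((List.range t.length).filter
      (fun (i : Nat) => decide (PySem.List.pyGet? t ((i : Nat) : Int) ≠ PySem.List.pyGet? (p :: t) ((i : Nat) : Int)))).map
      (fun (i : Nat) => (PySem.List.pyGet? t ((i : Nat) : Int)).getD "") = pvDedup (some p) t := by
  induction t with
  | nil => intro p; simp [pvDedup]
  | cons y ys ih =>
    intro p
    rw [List.length_cons, List.range_succ_eq_map]
    rw [List.filter_cons]
    simp only [List.filter_map]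
    simp only [PySem.List.pyGet?_natCast, Nat.cast_zero] at *
    simp only [Function.comp_def]
    simp only [PySem.List.pyGet?_zero_cons]
    by_cases hyp : y = p
    · subst hyp
      rw [if_neg (by simp)]
      simp only [List.map_map, Function.comp_def, Nat.succ_eq_add_one, List.getElem?_cons_succ]
      rw [show pvDedup (some y) (y :: ys) = pvDedup (some y) ys from by simp [pvDedup]]
      exact ih y
    · rw [if_pos (by simp [hyp])]
      simp only [List.map_cons, List.map_map, Function.comp_def, Nat.succ_eq_add_one,
        List.getElem?_cons_succ, List.getElem?_cons_zero, Option.getD_some]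
      rw [show pvDedup (some p) (y :: ys) = y :: pvDedup (some y) ys from by simp [pvDedup, Ne.symm hyp]]
      exact congrArg (y :: ·) (ih y)

lemma pvA1 (xs : List String) :
    ((List.range xs.length).filter
      (fun (i : Nat) => decide (i = 0 ∨ PySem.List.pyGet? xs ((i : Nat) : Int) ≠ PySem.List.pyGet? xs (((i : Nat) : Int) - 1)))).map
      (fun (i : Nat) => (PySem.List.pyGet? xs ((i : Nat) : Int)).getD "") = pvDedup none xs := by
  cases xs with
  | nil => simp [pvDedup]
  | cons x t =>
    rw [List.length_cons, List.range_succ_eq_map]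
    rw [List.filter_cons]
    rw [if_pos (by simp)]
    simp only [List.filter_map, List.map_cons, List.map_map, Function.comp_def,
      Nat.succ_eq_add_one]
    simp only [Nat.cast_zero, Nat.cast_add, Nat.cast_one]
    rw [show pvDedup none (x :: t) = x :: pvDedup (some x) t from by simp [pvDedup]]
    have h1 := pvA1gen t x
    simp only [PySem.List.pyGet?_natCast] at h1
    simp only [add_sub_cancel_right, Nat.add_one_ne_zero, false_or,
      PySem.List.pyGet?_cons_succ, PySem.List.pyGet?_zero_cons, PySem.List.pyGet?_natCast,
      Option.getD_some]
    exact congrArg (x :: ·) h1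

lemma pvA2 (f : List String) : ∀ (acc : Int),
    (List.range (f.length - 2)).foldl
      (fun acc (i : Nat) =>
        if PySem.List.pyGet? f ((i : Nat) : Int) ≠ PySem.List.pyGet? f (((i : Nat) : Int) + 2) ∧
           PySem.List.pyGet? f ((i : Nat) : Int) ≠ PySem.List.pyGet? f (((i : Nat) : Int) + 1)
        then acc + 1 else acc) acc = acc + pvAltCount f := by
  induction f with
  | nil => intro acc; simp [pvAltCount]
  | cons a t ih =>
    intro acc
    match t with
    | [] => simp [pvAltCount]
    | [b] => simp [pvAltCount]
    | b :: c :: r =>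
      have hlen : (a :: b :: c :: r).length - 2 = r.length + 1 := by simp
      rw [hlen, List.range_succ_eq_map]
      rw [List.foldl_cons, List.foldl_map]
      have hA : ∀ i : Nat, (((i + 1 : Nat) : Nat) : Int) + 2 = (((i + 3 : Nat) : Nat) : Int) := by
        intro i; omega
      have hB : ∀ i : Nat, (((i + 1 : Nat) : Nat) : Int) + 1 = (((i + 2 : Nat) : Nat) : Int) := by
        intro i; omega
      have h2 : ((2 : Nat) : Int) = ((0 : Nat) : Int) + 2 := by omega
      have h1 : ((1 : Nat) : Int) = ((0 : Nat) : Int) + 1 := by omega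
      simp only [Nat.succ_eq_add_one, hA, hB, ← h2, ← h1, PySem.List.pyGet?_natCast,
        List.getElem?_cons_succ, List.getElem?_cons_zero]
      have hih := ih (if (some a ≠ some c ∧ some a ≠ some b) then acc + 1 else acc)
      have hA' : ∀ i : Nat, ((i : Nat) : Int) + 2 = (((i + 2 : Nat) : Nat) : Int) := by
        intro i; omega
      have hB' : ∀ i : Nat, ((i : Nat) : Int) + 1 = (((i + 1 : Nat) : Nat) : Int) := by
        intro i; omega
      simp only [hA', hB', PySem.List.pyGet?_natCast, List.getElem?_cons_succ,
        List.length_cons] at hih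
      rw [show r.length + 1 + 1 - 2 = r.length from by omega] at hih
      rw [hih]
      rw [show pvAltCount (a :: b :: c :: r) = (if a ≠ c ∧ a ≠ b then 1 else 0) + pvAltCount (b :: c :: r) from rfl]
      by_cases hc1 : a = c
      · simp [hc1]
      · by_cases hc2 : a = b
        · simp [hc2]
        · simp [hc1, hc2]; ring

lemma pvB3 (r : List String) : ∀ (a b : String) (alt total : Int), 2 ≤ total →
    (pvLoopD r (some a) (some b) alt total).1 = alt + pvAltCount (a :: b :: r) := by
  induction r with
  | nil => intro a b alt total _; simp [pvLoopD, pvAltCount]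
  | cons c r' ih =>
    intro a b alt total htot
    simp only [pvLoopD]
    rw [ih b c _ _ (by omega)]
    rw [show pvAltCount (a :: b :: c :: r') = (if a ≠ c ∧ a ≠ b then 1 else 0) + pvAltCount (b :: c :: r') from rfl]
    have h3 : (3 : Int) ≤ total + 1 := by omega
    by_cases h1 : a = c
    · simp [h1]
    · by_cases h2 : a = b
      · simp [h2]
      · simp [h1, h2, h3]; ring

lemma pvB2 (f : List String) : ∀ (p2 p1 : Option String) (alt total : Int),
    (pvLoopD f p2 p1 alt total).2 = total + f.length := by
  induction f with
  | nil => intro p2 p1 alt total; simp [pvLoopD]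
  | cons x r ih => intro p2 p1 alt total; simp [pvLoopD, ih]; ring

lemma pvB4 (f : List String) :
    pvLoopD f none none 0 0 = (pvAltCount f, (f.length : Int)) := by
  match f with
  | [] => simp [pvLoopD, pvAltCount]
  | [a] => simp [pvLoopD, pvAltCount]
  | a :: b :: r =>
    have h1 : pvLoopD (a :: b :: r) none none 0 0 = pvLoopD r (some a) (some b) 0 2 := by
      simp [pvLoopD]
    rw [h1]
    have hfst := pvB3 r a b 0 2 (by omega)
    have hsnd := pvB2 r (some a) (some b) 0 2
    have : pvLoopD r (some a) (some b) 0 2 = ((pvLoopD r (some a) (some b) 0 2).1, (pvLoopD r (some a) (some b) 0 2).2) := rfl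
    rw [this, hfst, hsnd]
    simp
    ring

lemma pvB1 (xs : List String) : ∀ (last prev2 prev1 : Option String) (alt total : Int),
    pvAltLoop xs last prev2 prev1 alt total
      = pvLoopD ((pvDedup last xs).filter (fun a => a ≠ "other")) prev2 prev1 alt total := by
  induction xs with
  | nil => intro last p2 p1 alt total; simp [pvAltLoop, pvDedup, pvLoopD]
  | cons x r ih =>
    intro last p2 p1 alt total
    by_cases h : last = some x
    · simp [pvAltLoop, pvDedup, h, ih]
    · by_cases ho : x = "other"
      · subst ho; simp [pvAltLoop, pvDedup, h, ih]
      · simp [pvAltLoop, pvDedup, h, ho, ih, pvLoopD]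

-- ===== VERDICT (by name: the statement is the Claim_ definition above) =====
theorem count_alternations_and_entries_spec : Claim_equal_count_alternations_and_entries := by
  intro xs _
  show count_alternations_and_entries xs = count_alternations_and_entries_alt xs
  unfold count_alternations_and_entries count_alternations_and_entries_alt
  dsimp only
  rw [pvA1, pvB1, pvA2, pvB4]
  simp
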